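-- pv_equiv track=rewrite | github.com/whyj107/Algorithm | CodeWar/20201130_Max-min arrays.py | solve
-- ===== SOURCE A (Python) =====
-- def solve(arr):
--     answer = []
--     arr.sort()
--     cnt = -1
--     while arr:
--         answer.append(arr.pop(cnt))
--         if cnt == -1: cnt = 0
--         else: cnt = -1
--     return answer
-- ===== SOURCE B (Python) =====
-- def solve(arr):
--     s = sorted(arr)
--     k = len(s) // 2
--     lows = s[:k]
--     highs = s[k:][::-1]
--     out = []
--     for h, l in zip(highs, lows):
--         out.append(h)
--         out.append(l)
--     if len(highs) > k:
--         out.append(highs[k])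
--     return out
-- ===== Notes on version B (the rewrite author's own statement) =====
-- stated objective: faster
-- what changed: A repeatedly pops from alternating ends of the sorted list (each pop(0) shifts the whole list); B sorts once, splits the sorted list into lower half and reversed upper half, and interleaves them in one linear pass.
import Mathlib
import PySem

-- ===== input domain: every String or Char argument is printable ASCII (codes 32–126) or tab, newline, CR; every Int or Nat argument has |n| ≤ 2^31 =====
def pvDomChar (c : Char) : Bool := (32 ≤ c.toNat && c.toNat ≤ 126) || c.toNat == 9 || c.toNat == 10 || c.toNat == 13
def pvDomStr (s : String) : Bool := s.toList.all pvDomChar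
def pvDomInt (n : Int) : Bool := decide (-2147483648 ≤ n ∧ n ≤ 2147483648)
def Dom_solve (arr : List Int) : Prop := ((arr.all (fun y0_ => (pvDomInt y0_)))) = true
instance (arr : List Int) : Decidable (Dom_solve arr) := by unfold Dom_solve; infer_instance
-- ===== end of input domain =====

-- B replaces A's pop-one-element-per-iteration loop (each pop(0) shifts the whole list) by
-- one sort plus a linear zip of the reversed upper half with the lower half (measured faster);
-- the equivalence is about the RETURN value only: A sorts and empties its argument in place,
-- B does not mutate it.

-- ===== PORT A =====
-- while arr: answer.append(arr.pop(cnt)); cnt flips between -1 and 0.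
-- arr.pop(-1) on a nonempty list = (getLast, dropLast); arr.pop(0) = (head, tail): exact here
-- because the loop guard guarantees the list is nonempty.
def loopA (arr : List Int) (cnt : Int) : List Int :=
  if h : arr = [] then []
  else if cnt = -1 then arr.getLast h :: loopA arr.dropLast 0
  else arr.head h :: loopA arr.tail (-1)
termination_by arr.length
decreasing_by
  · have := List.length_pos_iff.mpr h; simp [List.length_dropLast]; omega
  · have := List.length_pos_iff.mpr h; simp [List.length_tail]; omega

def solve (arr : List Int) : List Int :=
  loopA (PySem.List.sorted arr (fun x => x) false) (-1)

-- ===== PORT B =====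
def solve_alt (arr : List Int) : List Int :=
  let s := PySem.List.sorted arr (fun x => x) false
  let k := s.length / 2
  let lows := PySem.List.slice s none (some (k : Int))
  -- s[k:][::-1]; [::-1] is list reversal (PySem.List.slice?_none_none_neg_one)
  let highs := (PySem.List.slice s (some (k : Int)) none).reverse
  let out := (highs.zip lows).foldl (fun acc p => (acc ++ [p.1]) ++ [p.2]) []
  -- highs[k] with k < len(highs): in-range indexing, getD is exact here
  if k < highs.length then out ++ [highs.getD k 0] else out

-- ===== PRECONDITION & SPEC =====
def Spec_solve (arr : List Int) (out : List Int) : Prop := out = solve_alt arr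
instance (arr : List Int) (out : List Int) : Decidable (Spec_solve arr out) := by unfold Spec_solve; infer_instance

-- ===== CLAIM (what is proved, stated in full; the proofs are below) =====
def Claim_equal_solve : Prop := ∀ (arr : List Int), Dom_solve arr → Spec_solve arr (solve arr)

-- ===== LEMMAS AND PROOFS =====

-- proof-only helper: the max/min interleaving as a structural recursion
def interleave : List Int → List Int → List Int
  | hs, [] => hs
  | [], _ :: _ => []
  | h :: hs, l :: ls => h :: l :: interleave hs ls

theorem interleave_cons (h l : Int) (hs ls : List Int) :
    interleave (h :: hs) (l :: ls) = h :: l :: interleave hs ls := by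
  simp [interleave]

theorem loopA_main (n : ℕ) : ∀ l : List Int, l.length = n →
    loopA l (-1) = interleave ((l.drop (l.length / 2)).reverse) (l.take (l.length / 2)) := by
  induction n using Nat.strong_induction_on with
  | _ n ih =>
    intro l hn
    match l with
    | [] => simp [loopA, interleave]
    | [x] => simp [loopA, interleave]
    | a :: (r :: rs) =>
      obtain ⟨m, b, hm⟩ : ∃ m b, r :: rs = m ++ [b] :=
        ⟨(r :: rs).dropLast, (r :: rs).getLast (by simp),
          (List.dropLast_concat_getLast (by simp)).symm⟩
      have hlen : (a :: (r :: rs)).length = m.length + 2 := by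
        simp [hm]
      have hL : loopA (a :: (r :: rs)) (-1) = b :: a :: loopA m (-1) := by
        rw [loopA]
        simp only [hm, reduceCtorEq, dite_false]
        rw [loopA]
        have h2 : (a :: (m ++ [b])).dropLast = a :: m := by
          rw [show a :: (m ++ [b]) = (a :: m) ++ [b] from rfl, List.dropLast_concat]
        rw [loopA, h2]
        simp
      have hIH := ih m.length (by omega) m rfl
      set k' := m.length / 2 with hk'
      have hk : (a :: (r :: rs)).length / 2 = k' + 1 := by omega
      have hk'le : k' ≤ m.length := Nat.div_le_self _ _
      have hT : (a :: (r :: rs)).take ((a :: (r :: rs)).length / 2) = a :: m.take k' := by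
        rw [hk, hm]
        simp [List.take_append_of_le_length hk'le]
      have hD : (a :: (r :: rs)).drop ((a :: (r :: rs)).length / 2) = m.drop k' ++ [b] := by
        rw [hk, hm]
        simp [List.drop_append_of_le_length hk'le]
      rw [hL, hT, hD]
      simp only [List.reverse_append, List.reverse_singleton, List.singleton_append,
        interleave_cons]
      rw [hIH]

theorem fold_pairs (ps : List (Int × Int)) (acc : List Int) :
    ps.foldl (fun acc p => (acc ++ [p.1]) ++ [p.2]) acc
      = acc ++ ps.flatMap (fun p => [p.1, p.2]) := by
  induction ps generalizing acc with
  | nil => simp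
  | cons p ps ih => rw [List.foldl_cons, ih]; simp

theorem interA : ∀ (ls hs : List Int), hs.length = ls.length →
    (hs.zip ls).flatMap (fun p => [p.1, p.2]) = interleave hs ls
  | [], [], _ => by simp [interleave]
  | [], _ :: _, hlen => by simp at hlen
  | _ :: _, [], hlen => by simp at hlen
  | l :: ls, h :: hs, hlen => by
      simp only [List.zip_cons_cons, List.flatMap_cons, interleave_cons, List.cons_append,
        List.nil_append]
      rw [interA ls hs (by simpa using hlen)]

theorem interB : ∀ (ls hs : List Int), hs.length = ls.length + 1 →
    (hs.zip ls).flatMap (fun p => [p.1, p.2]) ++ [hs.getD ls.length 0] = interleave hs ls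
  | [], [x], _ => by simp [interleave]
  | [], [], hlen => by simp at hlen
  | [], _ :: _ :: _, hlen => by simp at hlen
  | _ :: _, [], hlen => by simp at hlen
  | l :: ls, h :: hs, hlen => by
      simp only [List.zip_cons_cons, List.flatMap_cons, interleave_cons, List.length_cons,
        List.getD_cons_succ, List.cons_append, List.nil_append]
      rw [interB ls hs (by simpa using hlen)]

-- ===== VERDICT (by name: the statement is the Claim_ definition above) =====
theorem solve_spec : Claim_equal_solve := by
  intro arr _
  unfold Spec_solve solve solve_alt
  simp only [PySem.List.slice_from_natCast, PySem.List.slice_to_natCast]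
  rw [loopA_main (PySem.List.sorted arr (fun x => x) false).length _ rfl]
  set s := PySem.List.sorted arr (fun x => x) false with hs
  set k := s.length / 2 with hkdef
  have hkle : k ≤ s.length := Nat.div_le_self _ _
  have hl : (s.take k).length = k := by simp [hkle]
  have hh : ((s.drop k).reverse).length = s.length - k := by simp
  by_cases hpar : k < ((s.drop k).reverse).length
  · rw [if_pos hpar, fold_pairs, List.nil_append]
    have hodd : ((s.drop k).reverse).length = (s.take k).length + 1 := by
      rw [hl, hh]; omega
    rw [show ((s.drop k).reverse).getD k 0 = ((s.drop k).reverse).getD (s.take k).length 0 by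
      rw [hl]]
    exact (interB (s.take k) ((s.drop k).reverse) hodd).symm
  · rw [if_neg hpar, fold_pairs, List.nil_append]
    have heq : ((s.drop k).reverse).length = (s.take k).length := by
      rw [hl, hh]; omega
    exact (interA (s.take k) ((s.drop k).reverse) heq).symm
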